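-- pv_equiv track=rewrite | github.com/camilavib00/KdP | uebung_3_baselly_prahst.py | lovedDigits_while
-- ===== SOURCE A (Python) =====
-- def lovedDigits_while(num):
--     verliebte_zahl = ""
--     while num > 0:
--         rest = num % 10
--         if rest == 0: #2
--             verliebte_ziffer = 0
--         else: #1
--             verliebte_ziffer = 10 - rest
--         num //= 10
--         verliebte_zahl = str(verliebte_ziffer) + verliebte_zahl #berechnung ohne strings, aber Ausgabe mit
--     return verliebte_zahl
-- ===== SOURCE B (Python) =====
-- def lovedDigits_while(num):
--     if num <= 0:
--         return ""
--     return "".join(str((10 - int(c)) % 10) for c in str(num))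
-- ===== Notes on version B (the rewrite author's own statement) =====
-- stated objective: idiomatic
-- what changed: B builds the answer MSB-first by mapping each character of str(num) through (10-d)%10 and joining, instead of A's LSB-first divmod loop that prepends to an accumulator string.
import Mathlib
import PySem

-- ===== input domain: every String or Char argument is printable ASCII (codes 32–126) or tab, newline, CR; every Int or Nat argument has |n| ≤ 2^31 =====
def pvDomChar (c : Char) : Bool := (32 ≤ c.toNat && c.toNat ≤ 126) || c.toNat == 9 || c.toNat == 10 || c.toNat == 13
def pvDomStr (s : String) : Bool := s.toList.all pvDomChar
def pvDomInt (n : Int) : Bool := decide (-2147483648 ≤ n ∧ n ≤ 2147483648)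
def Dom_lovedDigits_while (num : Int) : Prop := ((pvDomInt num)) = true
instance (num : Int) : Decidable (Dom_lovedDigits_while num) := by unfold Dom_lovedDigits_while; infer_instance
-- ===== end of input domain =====

-- B maps each character of str(num) to (10-d)%10 MSB-first and joins, instead of A's
-- LSB-first divmod loop with string prepending; same return value everywhere.

-- ===== PORT A =====
-- the while loop of A, on the loop state (num, verliebte_zahl)
def lovedDigitsGo (num : Int) (acc : String) : String :=
  if _h : 0 < num then
    let rest := PySem.Int.mod num 10
    let z : Int := if rest = 0 then 0 else 10 - rest
    lovedDigitsGo (PySem.Int.floordiv num 10) (PySem.Int.toStr z ++ acc)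
  else acc
termination_by num.toNat
decreasing_by
  simp only [PySem.Int.floordiv_eq_ediv_of_pos (by norm_num : (0:Int) < 10)]
  omega

def lovedDigits_while (num : Int) : String := lovedDigitsGo num ""

-- ===== PORT B =====
-- int(c) is ported as (PySem.Int.ofChars? [c]).getD 0; it is exact here since every
-- character of str(num) for num > 0 is a decimal digit, on which ofChars? returns some.
def lovedDigitsMapChar (c : Char) : String :=
  PySem.Int.toStr (PySem.Int.mod (10 - (PySem.Int.ofChars? [c]).getD 0) 10)

def lovedDigits_while_alt (num : Int) : String :=
  if num ≤ 0 then ""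
  else PySem.Str.join "" ((PySem.Int.toChars num).map lovedDigitsMapChar)

-- ===== PRECONDITION & SPEC =====
def Spec_lovedDigits_while (num : Int) (out : String) : Prop := out = lovedDigits_while_alt num
instance (num : Int) (out : String) : Decidable (Spec_lovedDigits_while num out) := by unfold Spec_lovedDigits_while; infer_instance

-- ===== CLAIM (what is proved, stated in full; the proofs are below) =====
def Claim_equal_lovedDigits_while : Prop := ∀ (num : Int), Dom_lovedDigits_while num → Spec_lovedDigits_while num (lovedDigits_while num)

-- ===== LEMMAS AND PROOFS =====

-- accumulator lemma for Nat.toDigitsCore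
lemma toDigitsCore_acc (fuel n : Nat) (ds : List Char) :
    Nat.toDigitsCore 10 fuel n ds = Nat.toDigitsCore 10 fuel n [] ++ ds := by
  induction fuel generalizing n ds with
  | zero => simp [Nat.toDigitsCore]
  | succ f ih =>
    simp only [Nat.toDigitsCore]
    by_cases h : n / 10 = 0
    · simp [h]
    · simp only [h, if_false]
      rw [ih (n / 10) ((n % 10).digitChar :: ds), ih (n / 10) [(n % 10).digitChar]]
      simp

-- fuel irrelevance for Nat.toDigitsCore
lemma toDigitsCore_fuel (f1 f2 n : Nat) (h1 : n < f1) (h2 : n < f2) :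
    Nat.toDigitsCore 10 f1 n [] = Nat.toDigitsCore 10 f2 n [] := by
  induction f1 generalizing f2 n with
  | zero => omega
  | succ f ih =>
    obtain ⟨g, rfl⟩ : ∃ g, f2 = g + 1 := ⟨f2 - 1, by omega⟩
    simp only [Nat.toDigitsCore]
    by_cases h : n / 10 = 0
    · simp [h]
    · have hten : 10 ≤ n := by omega
      have hfa : n / 10 < f := by omega
      have hfb : n / 10 < g := by omega
      simp only [h, if_false]
      rw [toDigitsCore_acc f (n / 10), toDigitsCore_acc g (n / 10), ih g (n / 10) hfa hfb]

-- peel the last decimal digit of toDigits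
lemma toDigits_step (n : Nat) (h10 : 10 ≤ n) :
    Nat.toDigits 10 n = Nat.toDigits 10 (n / 10) ++ [(n % 10).digitChar] := by
  show Nat.toDigitsCore 10 (n + 1) n [] = Nat.toDigitsCore 10 (n / 10 + 1) (n / 10) [] ++ _
  rw [Nat.toDigitsCore]
  have h : ¬ n / 10 = 0 := by omega
  simp only [h, if_false]
  rw [toDigitsCore_acc n (n / 10), toDigitsCore_fuel n (n / 10 + 1) (n / 10) (by omega) (by omega)]

lemma toDigits_small (n : Nat) (h : n < 10) : Nat.toDigits 10 n = [n.digitChar] := by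
  interval_cases n <;> rfl

-- the per-digit agreement of A's branch and B's character map
lemma mapChar_eq (d : Nat) (h : d < 10) :
    (lovedDigitsMapChar d.digitChar).toList
      = (PySem.Int.toStr (if (d : Int) = 0 then 0 else 10 - (d : Int))).toList := by
  interval_cases d <;> decide

-- cast helpers for the loop arithmetic
lemma mod_ten_cast (n : Nat) : PySem.Int.mod (n : Int) 10 = ((n % 10 : Nat) : Int) := by
  rw [PySem.Int.mod_eq_emod_of_pos (by norm_num)]; omega

lemma floordiv_ten_cast (n : Nat) : PySem.Int.floordiv (n : Int) 10 = ((n / 10 : Nat) : Int) := by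
  rw [PySem.Int.floordiv_eq_ediv_of_pos (by norm_num)]; omega

-- joining with the empty separator is flattening
lemma flatten_intersperse_nil {α : Type} (L : List (List α)) :
    (List.intersperse ([] : List α) L).flatten = L.flatten := by
  induction L with
  | nil => rfl
  | cons x xs ih =>
    cases xs with
    | nil => rfl
    | cons y ys => simpa [List.intersperse] using ih

-- A's loop computes B's flattened digit map, digit list stated over Nat
lemma go_eq (n : Nat) (hn : 0 < n) : ∀ acc : String,
    (lovedDigitsGo (n : Int) acc).toList
      = (List.map (fun c => (lovedDigitsMapChar c).toList) (Nat.toDigits 10 n)).flatten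
          ++ acc.toList := by
  induction n using Nat.strong_induction_on with
  | _ n ih =>
    intro acc
    rw [lovedDigitsGo]
    have hpos : (0 : Int) < (n : Int) := by exact_mod_cast hn
    simp only [dif_pos hpos, mod_ten_cast, floordiv_ten_cast]
    by_cases h10 : n < 10
    · have hdiv : n / 10 = 0 := by omega
      have hmod : n % 10 = n := by omega
      rw [hdiv, hmod]
      rw [lovedDigitsGo]
      simp only [Nat.cast_zero, dif_neg (by omega : ¬ (0:Int) < 0)]
      rw [toDigits_small n h10]
      simp only [List.map_cons, List.map_nil, List.flatten_cons, List.flatten_nil,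
        List.append_nil]
      rw [mapChar_eq n h10, String.toList_append]
    · have hposdiv : 0 < n / 10 := by omega
      rw [ih (n / 10) (by omega) hposdiv]
      rw [toDigits_step n (by omega), String.toList_append]
      simp only [List.map_append, List.map_cons, List.map_nil, List.flatten_append,
        List.flatten_cons, List.flatten_nil, List.append_nil, List.append_assoc]
      rw [mapChar_eq (n % 10) (by omega)]

-- ===== VERDICT (by name: the statement is the Claim_ definition above) =====
theorem lovedDigits_while_spec : Claim_equal_lovedDigits_while := by
  intro num _
  show lovedDigits_while num = lovedDigits_while_alt num
  unfold lovedDigits_while lovedDigits_while_alt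
  by_cases h : num ≤ 0
  · rw [lovedDigitsGo]
    simp [h, show ¬ (0 : Int) < num by omega]
  · rw [if_neg h]
    apply String.toList_inj.mp
    have hex : ∃ n : Nat, num = (n : Int) := ⟨num.toNat, by omega⟩
    obtain ⟨n, rfl⟩ := hex
    have hn : 0 < n := by exact_mod_cast show (0:Int) < (n:Int) by omega
    rw [go_eq n hn ""]
    simp only [PySem.Int.toChars, if_neg (show ¬ ((n : Int) < 0) by omega), Int.toNat_natCast]
    simp [PySem.Str.join, PySem.Chars.join, List.intercalate, flatten_intersperse_nil,
      Function.comp_def]
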